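-- pv_equiv track=rewrite | github.com/igorK1977/python-project-50 | gendiff/gendiff_proc.py | create_diff
-- ===== SOURCE A (Python) =====
-- def create_diff(data1, data2):
--     keys = sorted(list(set(list(data1.keys()) + list(data2.keys()))))
--     diff = []
--     for key in keys:
--         item = {'key': key}
--         if key in data1 and key not in data2:
--             item['value'] = data1[key]
--             item['status'] = 'deleted'
--         if key in data1 and key in data2:
--             item['value'] = data1[key]
--             if data1[key] == data2[key]:
--                 item['status'] = 'nonchanged'
--             else:
--                 item['status'] = 'changed'
--                 item['new_value'] = data2[key]
--         if key not in data1 and key in data2: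
--             item['status'] = 'added'
--             item['value'] = data2[key]
--         diff.append(item)
--     return diff
-- ===== SOURCE B (Python) =====
-- def create_diff(data1, data2):
--     deleted = set(data1) - set(data2)
--     added = set(data2) - set(data1)
--     common = set(data1) & set(data2)
--     items = []
--     for key in deleted:
--         items.append({'key': key, 'value': data1[key], 'status': 'deleted'})
--     for key in added:
--         items.append({'key': key, 'status': 'added', 'value': data2[key]})
--     for key in common:
--         if data1[key] == data2[key]:
--             items.append({'key': key, 'value': data1[key], 'status': 'nonchanged'})
--         else:
--             items.append({'key': key, 'value': data1[key],
--                           'status': 'changed', 'new_value': data2[key]})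
--     return sorted(items, key=lambda item: item['key'])
-- ===== Notes on version B (the rewrite author's own statement) =====
-- stated objective: alternative
-- what changed: B partitions the keys with set operations into deleted/added/common groups, builds each group's item dicts in a separate loop, and sorts the concatenated item list by item key at the end, replacing A's single pass over the pre-sorted union of keys with three membership tests per key.
import Mathlib
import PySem

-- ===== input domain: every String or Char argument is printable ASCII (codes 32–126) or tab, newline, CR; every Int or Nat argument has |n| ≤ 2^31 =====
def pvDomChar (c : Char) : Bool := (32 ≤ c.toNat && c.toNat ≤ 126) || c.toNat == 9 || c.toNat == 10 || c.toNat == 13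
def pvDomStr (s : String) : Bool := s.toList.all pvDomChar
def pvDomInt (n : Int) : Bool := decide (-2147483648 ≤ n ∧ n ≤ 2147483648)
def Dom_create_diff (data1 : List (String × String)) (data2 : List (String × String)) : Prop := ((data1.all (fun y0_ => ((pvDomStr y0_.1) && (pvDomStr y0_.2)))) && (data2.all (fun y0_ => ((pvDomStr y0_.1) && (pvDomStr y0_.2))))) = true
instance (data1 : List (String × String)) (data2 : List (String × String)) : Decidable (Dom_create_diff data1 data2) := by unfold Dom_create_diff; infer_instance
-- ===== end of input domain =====

-- B builds the deleted/added/common groups with set operations, emits each group's items in its own loop,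
-- and sorts the concatenated items by key at the end — an alternative decomposition of A's single pass over sorted keys.

-- ===== PORT A =====
-- the body of A's loop: build the per-key item dict by the three guarded blocks
def pvItemA (d1 d2 : PySem.Dict String String) (key : String) : PySem.Dict String String :=
  let item : PySem.Dict String String := PySem.Dict.empty.insert "key" key
  let item := if d1.contains key && !d2.contains key then
      (item.insert "value" (d1.getD key "")).insert "status" "deleted"
    else item
  let item := if d1.contains key && d2.contains key then
      (let item := item.insert "value" (d1.getD key "")
       if d1.getD key "" = d2.getD key "" then item.insert "status" "nonchanged"
       else (item.insert "status" "changed").insert "new_value" (d2.getD key ""))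
    else item
  let item := if !d1.contains key && d2.contains key then
      (item.insert "status" "added").insert "value" (d2.getD key "")
    else item
  item

def create_diff (data1 : List (String × String)) (data2 : List (String × String)) : List (List (String × String)) :=
  let d1 := PySem.Dict.mk data1
  let d2 := PySem.Dict.mk data2
  let keys := PySem.List.sorted (PySem.Set.ofList (d1.keys ++ d2.keys)) (fun x => x)
  keys.foldl (fun diff key => diff ++ [(pvItemA d1 d2 key).items]) []

-- ===== PORT B =====
def create_diff_alt (data1 : List (String × String)) (data2 : List (String × String)) : List (List (String × String)) :=
  let d1 := PySem.Dict.mk data1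
  let d2 := PySem.Dict.mk data2
  let deleted := PySem.Set.diff (PySem.Set.ofList d1.keys) (PySem.Set.ofList d2.keys)
  let added := PySem.Set.diff (PySem.Set.ofList d2.keys) (PySem.Set.ofList d1.keys)
  let common := PySem.Set.inter (PySem.Set.ofList d1.keys) (PySem.Set.ofList d2.keys)
  let items :=
    deleted.map (fun k => [("key", k), ("value", d1.getD k ""), ("status", "deleted")])
    ++ added.map (fun k => [("key", k), ("status", "added"), ("value", d2.getD k "")])
    ++ common.map (fun k =>
         if d1.getD k "" = d2.getD k "" then
           [("key", k), ("value", d1.getD k ""), ("status", "nonchanged")]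
         else
           [("key", k), ("value", d1.getD k ""), ("status", "changed"), ("new_value", d2.getD k "")])
  PySem.List.sorted items (fun item => (PySem.Dict.mk item).getD "key" "")

-- ===== PRECONDITION & SPEC =====
def Spec_create_diff (data1 : List (String × String)) (data2 : List (String × String)) (out : List (List (String × String))) : Prop := out = create_diff_alt data1 data2
instance (data1 : List (String × String)) (data2 : List (String × String)) (out : List (List (String × String))) : Decidable (Spec_create_diff data1 data2 out) := by unfold Spec_create_diff; infer_instance

-- ===== CLAIM (what is proved, stated in full; the proofs are below) =====
def Claim_equal_create_diff : Prop := ∀ (data1 : List (String × String)) (data2 : List (String × String)), Dom_create_diff data1 data2 → Spec_create_diff data1 data2 (create_diff data1 data2)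

-- ===== LEMMAS AND PROOFS =====

-- every item built by A's loop body starts with ("key", key), so B's sort key reads it back
theorem pvItemA_key (d1 d2 : PySem.Dict String String) (k : String) :
    (PySem.Dict.mk (pvItemA d1 d2 k).items).getD "key" "" = k := by
  unfold pvItemA
  split_ifs <;> rfl

-- A's item for a deleted key is B's deleted item, and so on for the four cases
theorem pvItemA_deleted (d1 d2 : PySem.Dict String String) (k : String)
    (h1 : d1.contains k = true) (h2 : d2.contains k = false) :
    (pvItemA d1 d2 k).items = [("key", k), ("value", d1.getD k ""), ("status", "deleted")] := by
  simp [pvItemA, h1, h2]; rfl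

theorem pvItemA_added (d1 d2 : PySem.Dict String String) (k : String)
    (h1 : d1.contains k = false) (h2 : d2.contains k = true) :
    (pvItemA d1 d2 k).items = [("key", k), ("status", "added"), ("value", d2.getD k "")] := by
  simp [pvItemA, h1, h2]; rfl

theorem pvItemA_common (d1 d2 : PySem.Dict String String) (k : String)
    (h1 : d1.contains k = true) (h2 : d2.contains k = true) :
    (pvItemA d1 d2 k).items =
      (if d1.getD k "" = d2.getD k "" then
         [("key", k), ("value", d1.getD k ""), ("status", "nonchanged")]
       else
         [("key", k), ("value", d1.getD k ""), ("status", "changed"), ("new_value", d2.getD k "")]) := by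
  simp [pvItemA, h1, h2]
  split_ifs <;> rfl

-- ===== VERDICT (by name: the statement is the Claim_ definition above) =====
theorem create_diff_spec : Claim_equal_create_diff := by
  intro data1 data2 _
  unfold Spec_create_diff create_diff create_diff_alt
  simp only []
  set d1 := PySem.Dict.mk data1 with hd1
  set d2 := PySem.Dict.mk data2 with hd2
  rw [PySem.List.foldl_append_singleton_eq_map (fun key => (pvItemA d1 d2 key).items)]
  simp only [List.nil_append]
  set keys := PySem.List.sorted (PySem.Set.ofList (d1.keys ++ d2.keys)) (fun x => x) with hkeys
  set deleted := PySem.Set.diff (PySem.Set.ofList d1.keys) (PySem.Set.ofList d2.keys) with hdel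
  set added := PySem.Set.diff (PySem.Set.ofList d2.keys) (PySem.Set.ofList d1.keys) with hadd
  set common := PySem.Set.inter (PySem.Set.ofList d1.keys) (PySem.Set.ofList d2.keys) with hcom
  have hmemdel : ∀ k, k ∈ deleted ↔ (k ∈ d1.keys ∧ ¬ k ∈ d2.keys) := by
    intro k; rw [hdel]; simp [PySem.Set.mem_diff, PySem.Set.mem_ofList]
  have hmemadd : ∀ k, k ∈ added ↔ (k ∈ d2.keys ∧ ¬ k ∈ d1.keys) := by
    intro k; rw [hadd]; simp [PySem.Set.mem_diff, PySem.Set.mem_ofList]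
  have hmemcom : ∀ k, k ∈ common ↔ (k ∈ d1.keys ∧ k ∈ d2.keys) := by
    intro k; rw [hcom]; simp [PySem.Set.mem_inter, PySem.Set.mem_ofList]
  -- the three groups together are a permutation of the deduped union of keys
  have hperm0 : (PySem.Set.ofList (d1.keys ++ d2.keys)).Perm (deleted ++ added ++ common) := by
    rw [List.perm_ext_iff_of_nodup (PySem.Set.nodup_ofList _)]
    · intro a
      simp only [List.mem_append, PySem.Set.mem_ofList, hmemdel, hmemadd, hmemcom]
      tauto
    · refine (List.nodup_append.mpr ⟨(List.nodup_append.mpr ⟨?_, ?_, ?_⟩), ?_, ?_⟩)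
      · exact PySem.Set.nodup_diff _ _ (PySem.Set.nodup_ofList _)
      · exact PySem.Set.nodup_diff _ _ (PySem.Set.nodup_ofList _)
      · intro a ha b hb; rw [hmemdel] at ha; rw [hmemadd] at hb; rintro rfl; tauto
      · exact PySem.Set.nodup_inter _ _ (PySem.Set.nodup_ofList _)
      · intro a ha b hb
        rw [List.mem_append] at ha
        rw [hmemcom] at hb
        rintro rfl
        rcases ha with ha | ha
        · rw [hmemdel] at ha; tauto
        · rw [hmemadd] at ha; tauto
  have hkperm : keys.Perm (deleted ++ added ++ common) :=
    (PySem.List.sorted_perm _ _ _).trans hperm0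
  -- mapping A's item builder over the grouped keys gives exactly B's item lists
  have hmap : (deleted ++ added ++ common).map (fun key => (pvItemA d1 d2 key).items) =
      deleted.map (fun k => [("key", k), ("value", d1.getD k ""), ("status", "deleted")])
      ++ added.map (fun k => [("key", k), ("status", "added"), ("value", d2.getD k "")])
      ++ common.map (fun k =>
           if d1.getD k "" = d2.getD k "" then
             [("key", k), ("value", d1.getD k ""), ("status", "nonchanged")]
           else
             [("key", k), ("value", d1.getD k ""), ("status", "changed"), ("new_value", d2.getD k "")]) := by
    simp only [List.map_append]
    congr 1
    congr 1
    · apply List.map_congr_left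
      intro k hk
      rw [hmemdel] at hk
      exact pvItemA_deleted d1 d2 k ((PySem.Dict.contains_iff_mem_keys d1 k).mpr hk.1)
        (by rcases h : d2.contains k with _ | _
            · rfl
            · exact absurd ((PySem.Dict.contains_iff_mem_keys d2 k).mp h) hk.2)
    · apply List.map_congr_left
      intro k hk
      rw [hmemadd] at hk
      exact pvItemA_added d1 d2 k
        (by rcases h : d1.contains k with _ | _
            · rfl
            · exact absurd ((PySem.Dict.contains_iff_mem_keys d1 k).mp h) hk.2)
        ((PySem.Dict.contains_iff_mem_keys d2 k).mpr hk.1)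
    · apply List.map_congr_left
      intro k hk
      rw [hmemcom] at hk
      exact pvItemA_common d1 d2 k ((PySem.Dict.contains_iff_mem_keys d1 k).mpr hk.1)
        ((PySem.Dict.contains_iff_mem_keys d2 k).mpr hk.2)
  refine (PySem.List.sorted_eq_of_perm_of_pairwise_lt _ _ _ ?_ ?_).symm
  · rw [← hmap]
    exact hkperm.map _
  · have hpw : keys.Pairwise (fun a b => a < b) := by
      rw [hkeys]; exact PySem.List.sorted_ofList_pairwise_lt _
    rw [List.pairwise_map]
    refine hpw.imp ?_
    intro a b hab
    rwa [pvItemA_key, pvItemA_key]
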